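-- pv_equiv track=rewrite | github.com/clhpeterson/ladymondegreen | rough_templates.py | rough_templates
-- ===== SOURCE A (Python) =====
-- def consonant_cluster_templates (consonant_cluster):
-- 	to_return = []
-- 	if len (consonant_cluster) == 1:
-- 		of_interest = consonant_cluster[0]
-- 		to_return += [[["c"], [of_interest]], [["c", "v", "c"], [of_interest, "v", of_interest]]]
-- 	else:
-- 		of_interest = consonant_cluster[0]
-- 		all_variations = consonant_cluster_templates (consonant_cluster[1:])
-- 		for entry in all_variations:
-- 			to_return += [[entry[0], [of_interest] + entry[1]],[["c", "v"]+entry[0], [of_interest, "v"] + entry[1]], [["c", "v"]+entry[0], [of_interest, "v", of_interest] + entry[1]]]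
-- 	return to_return
--
-- def rough_templates (word, vowels, blank_code):
-- 	# word should already be in the form of a consonant cluster
-- 	templates = []
-- 	lengths = []
--
-- 	for entry in word:
-- 		if entry[0] == "v":
-- 			vowel = entry[1][0]
-- 			new_temps = [	[["v"], [vowel]], 	[[], []],	[["v", "v"], [vowel, vowel]], 	[["v", "c", "v"], [vowel, blank_code, vowel]]	]
-- 			templates.append (new_temps)
-- 			lengths.append (4)
-- 		else:
-- 			consonant_cluster = entry[1]
-- 			returned = consonant_cluster_templates (consonant_cluster)
-- 			templates.append (returned)
-- 			lengths.append (len (returned))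
-- 	return templates, lengths
-- ===== SOURCE B (Python) =====
-- def _entry_templates(entry, blank_code):
--     if entry[0] == "v":
--         v = entry[1][0]
--         return [[["v"], [v]], [[], []], [["v", "v"], [v, v]],
--                 [["v", "c", "v"], [v, blank_code, v]]]
--     cs = entry[1]
--     last = cs[-1]
--     result = [[["c"], [last]], [["c", "v", "c"], [last, "v", last]]]
--     for ch in reversed(cs[:-1]):
--         result = [new for e in result for new in (
--             [e[0], [ch] + e[1]],
--             [["c", "v"] + e[0], [ch, "v"] + e[1]],
--             [["c", "v"] + e[0], [ch, "v", ch] + e[1]])]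
--     return result
--
--
-- def rough_templates(word, vowels, blank_code):
--     templates = [_entry_templates(entry, blank_code) for entry in word]
--     return templates, [len(t) for t in templates]
-- ===== Notes on version B (the rewrite author's own statement) =====
-- stated objective: alternative
-- what changed: The recursive consonant_cluster_templates is replaced by an iterative fold that starts from the base entries for the last consonant and expands right-to-left, and the outer accumulator loop becomes a map plus a lengths map.
import Mathlib
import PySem

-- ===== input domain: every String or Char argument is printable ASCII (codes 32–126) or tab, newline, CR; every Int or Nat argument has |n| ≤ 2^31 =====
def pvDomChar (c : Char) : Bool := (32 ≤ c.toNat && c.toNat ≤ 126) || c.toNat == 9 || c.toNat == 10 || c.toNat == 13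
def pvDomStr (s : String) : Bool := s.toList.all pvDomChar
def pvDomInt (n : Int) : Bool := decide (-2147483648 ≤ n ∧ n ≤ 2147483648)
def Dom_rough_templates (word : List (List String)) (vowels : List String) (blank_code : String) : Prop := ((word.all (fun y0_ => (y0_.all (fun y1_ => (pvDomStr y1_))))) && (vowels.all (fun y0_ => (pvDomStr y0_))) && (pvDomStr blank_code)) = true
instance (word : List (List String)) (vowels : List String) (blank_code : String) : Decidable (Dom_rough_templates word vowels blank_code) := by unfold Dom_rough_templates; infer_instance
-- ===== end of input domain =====

-- B replaces the recursive cluster-template generator by an iterative right-to-left fold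
-- and the outer accumulator loop by two maps; objective: alternative decomposition, same cost.

-- ===== PORT A =====
-- A indexes the cluster string char by char; ported over String.toList (exact on the ASCII domain).
def consonant_cluster_templates (consonant_cluster : List Char) : List (List (List String)) :=
  match consonant_cluster with
  | [] => []  -- Python recurses forever here (RecursionError); such inputs are excluded by Pre_
  | [c] =>
      let of_interest := String.singleton c
      [[["c"], [of_interest]], [["c", "v", "c"], [of_interest, "v", of_interest]]]
  | c :: rest =>
      let of_interest := String.singleton c
      (consonant_cluster_templates rest).foldl (fun to_return entry =>
        to_return ++
          [[entry.getD 0 [], [of_interest] ++ entry.getD 1 []],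
           [["c", "v"] ++ entry.getD 0 [], [of_interest, "v"] ++ entry.getD 1 []],
           [["c", "v"] ++ entry.getD 0 [], [of_interest, "v", of_interest] ++ entry.getD 1 []]]) []

def rough_templates (word : List (List String)) (vowels : List String) (blank_code : String) : List (List (List (List String))) × List Int :=
  word.foldl (fun st entry =>
    if entry.getD 0 "" == "v" then
      let vowel := String.singleton ((entry.getD 1 "").toList.headD ' ')
      let new_temps := [[["v"], [vowel]], [[], []], [["v", "v"], [vowel, vowel]],
                        [["v", "c", "v"], [vowel, blank_code, vowel]]]
      (st.1 ++ [new_temps], st.2 ++ [4])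
    else
      let returned := consonant_cluster_templates (entry.getD 1 "").toList
      (st.1 ++ [returned], st.2 ++ [(returned.length : Int)]))
    (([], []) : List (List (List (List String))) × List Int)

-- ===== PORT B =====
def pvStep (ch : String) (result : List (List (List String))) : List (List (List String)) :=
  result.flatMap (fun e =>
    [[e.getD 0 [], [ch] ++ e.getD 1 []],
     [["c", "v"] ++ e.getD 0 [], [ch, "v"] ++ e.getD 1 []],
     [["c", "v"] ++ e.getD 0 [], [ch, "v", ch] ++ e.getD 1 []]])

def pvEntryTemplates (entry : List String) (blank_code : String) : List (List (List String)) :=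
  if entry.getD 0 "" == "v" then
    let v := String.singleton ((entry.getD 1 "").toList.headD ' ')
    [[["v"], [v]], [[], []], [["v", "v"], [v, v]], [["v", "c", "v"], [v, blank_code, v]]]
  else
    let cs := (entry.getD 1 "").toList
    let last := String.singleton (cs.getLastD ' ')
    ((cs.dropLast.reverse).foldl (fun result c => pvStep (String.singleton c) result)
      [[["c"], [last]], [["c", "v", "c"], [last, "v", last]]])

def rough_templates_alt (word : List (List String)) (vowels : List String) (blank_code : String) : List (List (List (List String))) × List Int :=
  let templates := word.map (fun e => pvEntryTemplates e blank_code)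
  (templates, templates.map (fun t => (t.length : Int)))

-- ===== PRECONDITION & SPEC =====
-- Pre_ excludes exactly the inputs on which the Python A raises: an entry with fewer than
-- two fields (IndexError on entry[1] / entry[0]) or an empty second field (IndexError on
-- entry[1][0], or unbounded recursion on an empty consonant cluster).
def Pre_rough_templates (word : List (List String)) (vowels : List String) (blank_code : String) : Prop :=
  ∀ e ∈ word, 2 ≤ e.length ∧ (e.getD 1 "") ≠ ""
instance (word : List (List String)) (vowels : List String) (blank_code : String) : Decidable (Pre_rough_templates word vowels blank_code) := by unfold Pre_rough_templates; infer_instance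

def pvWitness_rough_templates : List (List String) × List String × String := ([["v", "a"], ["c", "st"]], ["a"], "B")

def Spec_rough_templates (word : List (List String)) (vowels : List String) (blank_code : String) (out : List (List (List (List String))) × List Int) : Prop := out = rough_templates_alt word vowels blank_code
instance (word : List (List String)) (vowels : List String) (blank_code : String) (out : List (List (List (List String))) × List Int) : Decidable (Spec_rough_templates word vowels blank_code out) := by unfold Spec_rough_templates; infer_instance

-- ===== CLAIM (what is proved, stated in full; the proofs are below) =====
def Claim_equal_rough_templates : Prop := ∀ (word : List (List String)) (vowels : List String) (blank_code : String), Dom_rough_templates word vowels blank_code → Pre_rough_templates word vowels blank_code → Spec_rough_templates word vowels blank_code (rough_templates word vowels blank_code)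

-- ===== LEMMAS AND PROOFS =====

-- A's recursive step, with the accumulator loop rewritten as a flatMap.
theorem cct_cons (c c' : Char) (t : List Char) :
    consonant_cluster_templates (c :: c' :: t)
      = pvStep (String.singleton c) (consonant_cluster_templates (c' :: t)) := by
  simp [consonant_cluster_templates, pvStep, List.flatMap]

-- The recursion equals B's right-to-left fold on any nonempty cluster.
theorem cct_eq_fold : ∀ (rest : List Char) (c : Char),
    consonant_cluster_templates (c :: rest)
      = ((c :: rest).dropLast.reverse).foldl (fun result c => pvStep (String.singleton c) result)
          (let last := String.singleton ((c :: rest).getLastD ' ')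
           [[["c"], [last]], [["c", "v", "c"], [last, "v", last]]]) := by
  intro rest
  induction rest with
  | nil => intro c; simp [consonant_cluster_templates]
  | cons c' t ih =>
      intro c
      rw [cct_cons, ih c']
      simp [List.foldl_append]

theorem entry_eq (e : List String) (blank_code : String) (h : (e.getD 1 "") ≠ "") :
    (if e.getD 0 "" == "v" then
      let vowel := String.singleton ((e.getD 1 "").toList.headD ' ')
      [[["v"], [vowel]], [[], []], [["v", "v"], [vowel, vowel]],
       [["v", "c", "v"], [vowel, blank_code, vowel]]]
    else consonant_cluster_templates (e.getD 1 "").toList) = pvEntryTemplates e blank_code := by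
  unfold pvEntryTemplates
  split_ifs with hv
  · rfl
  · have hne : (e.getD 1 "").toList ≠ [] := by
      intro hc
      simp_all
    cases hl : (e.getD 1 "").toList with
    | nil => exact absurd hl hne
    | cons c rest => exact cct_eq_fold rest c

theorem fold_eq (blank_code : String) : ∀ (word : List (List String))
    (t0 : List (List (List (List String)))) (l0 : List Int),
    (∀ e ∈ word, (e.getD 1 "") ≠ "") →
    word.foldl (fun st entry =>
      if entry.getD 0 "" == "v" then
        let vowel := String.singleton ((entry.getD 1 "").toList.headD ' ')
        let new_temps := [[["v"], [vowel]], [[], []], [["v", "v"], [vowel, vowel]],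
                          [["v", "c", "v"], [vowel, blank_code, vowel]]]
        (st.1 ++ [new_temps], st.2 ++ [4])
      else
        let returned := consonant_cluster_templates (entry.getD 1 "").toList
        (st.1 ++ [returned], st.2 ++ [(returned.length : Int)])) (t0, l0)
    = (t0 ++ word.map (fun e => pvEntryTemplates e blank_code),
       l0 ++ word.map (fun e => ((pvEntryTemplates e blank_code).length : Int))) := by
  intro word
  induction word with
  | nil => intro t0 l0 _; simp
  | cons e rest ih =>
      intro t0 l0 h
      have he : (e.getD 1 "") ≠ "" := (h e (by simp))
      have heq := entry_eq e blank_code he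
      simp only [List.foldl_cons, List.map_cons]
      rw [ih _ _ (fun x hx => h x (by simp [hx]))]
      split_ifs with hv <;> simp_all [← heq]

-- ===== VERDICT (by name: the statement is the Claim_ definition above) =====
theorem rough_templates_spec : Claim_equal_rough_templates := by
  intro word vowels blank_code _ hpre
  unfold Spec_rough_templates rough_templates rough_templates_alt
  rw [fold_eq blank_code word [] [] (fun e he => (hpre e he).2)]
  simp [List.map_map]
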